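-- pv_equiv track=rewrite | github.com/stephen-th0ma5/Brain_Computing_Assignment_2 | snn.py | __fr_encoded_input
-- ===== SOURCE A (Python) =====
-- def __fr_encoded_input(input):
--     """ encodes input via firing rate encoding
--     returns 100ms period with spiking activity (1) vs no spiking activity (0)
--     """
--     encoded_input = []
--     spike_freq = 20 if input == 0 else 10
--     for t in range(100):
--         if (t + 1) % spike_freq == 0 and t != 0:
--             encoded_input.append(1)
--         else:
--             encoded_input.append(0)
--     return encoded_input
-- ===== SOURCE B (Python) =====
-- def __fr_encoded_input(input):
--     """ encodes input via firing rate encoding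
--     returns 100ms period with spiking activity (1) vs no spiking activity (0)
--     """
--     encoded_input = [0] * 100
--     spike_freq = 20 if input == 0 else 10
--     for i in range(spike_freq - 1, 100, spike_freq):
--         encoded_input[i] = 1
--     return encoded_input
-- ===== Notes on version B (the rewrite author's own statement) =====
-- stated objective: idiomatic
-- what changed: B pre-allocates a zero list of the fixed window length and writes the spike positions directly by striding in steps of spike_freq, instead of scanning every timestep and testing (t+1) % spike_freq (and dropping the never-firing t != 0 guard).
import Mathlib
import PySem

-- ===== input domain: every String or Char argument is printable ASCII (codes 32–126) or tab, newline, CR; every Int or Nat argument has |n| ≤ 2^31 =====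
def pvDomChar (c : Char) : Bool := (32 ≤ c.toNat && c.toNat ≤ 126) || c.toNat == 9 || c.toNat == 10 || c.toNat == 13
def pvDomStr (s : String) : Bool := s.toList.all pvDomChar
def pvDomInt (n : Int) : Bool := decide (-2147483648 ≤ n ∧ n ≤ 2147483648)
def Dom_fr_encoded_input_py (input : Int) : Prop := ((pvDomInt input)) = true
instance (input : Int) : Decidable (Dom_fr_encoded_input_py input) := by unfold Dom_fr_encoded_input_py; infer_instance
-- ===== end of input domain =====

-- B writes the spike positions by striding, instead of scanning all 100 timesteps with a modulo test (idiomatic).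
-- ===== PORT A =====
def fr_encoded_input_py (input : Int) : List Int :=
  let spike_freq : Int := if input == 0 then 20 else 10
  (PySem.List.pyRange 0 100 1).foldl
    (fun encoded_input t =>
      if PySem.Int.mod (t + 1) spike_freq == 0 && t != 0 then
        encoded_input ++ [1]
      else
        encoded_input ++ [0]) []

-- ===== PORT B =====
def fr_encoded_input_py_alt (input : Int) : List Int :=
  let spike_freq : Int := if input == 0 then 20 else 10
  (PySem.List.pyRange (spike_freq - 1) 100 spike_freq).foldl
    (fun encoded_input i => encoded_input.set i.toNat 1) (List.replicate 100 0)

-- ===== PRECONDITION & SPEC =====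
def Spec_fr_encoded_input_py (input : Int) (out : List Int) : Prop := out = fr_encoded_input_py_alt input
instance (input : Int) (out : List Int) : Decidable (Spec_fr_encoded_input_py input out) := by unfold Spec_fr_encoded_input_py; infer_instance

-- ===== CLAIM (what is proved, stated in full; the proofs are below) =====
def Claim_equal_fr_encoded_input_py : Prop := ∀ (input : Int), Dom_fr_encoded_input_py input → Spec_fr_encoded_input_py input (fr_encoded_input_py input)

-- ===== LEMMAS AND PROOFS =====

-- ===== VERDICT (by name: the statement is the Claim_ definition above) =====
-- Both ports depend on the input only through the test input == 0.
theorem pyA_cases (input : Int) :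
    fr_encoded_input_py input = if input == 0 then fr_encoded_input_py 0 else fr_encoded_input_py 1 := by
  unfold fr_encoded_input_py
  by_cases h : input = 0 <;> simp [h]

theorem pyB_cases (input : Int) :
    fr_encoded_input_py_alt input = if input == 0 then fr_encoded_input_py_alt 0 else fr_encoded_input_py_alt 1 := by
  unfold fr_encoded_input_py_alt
  by_cases h : input = 0 <;> simp [h]

set_option maxRecDepth 4000 in
theorem fr_encoded_input_py_spec : Claim_equal_fr_encoded_input_py := by
  intro input _
  unfold Spec_fr_encoded_input_py
  rw [pyA_cases, pyB_cases]
  by_cases h : input = 0 <;> simp [h] <;> decide
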